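-- pv_equiv track=rewrite | github.com/gimquokka/problem-solving | Programers/문자열_압축/문자열_압축.py | solution
-- ===== SOURCE A (Python) =====
-- def solution(s):
--     l = len(s)
--     min_l = l
--     for step in range(1, l//2+1):
--         sub_l = 0
--         cnt = 1
--         prev = s[:step]
--         for idx in range(0, l-step, step):
--             if(s[idx:idx+step] == s[idx+step:idx+2*step]):
--                 if (prev == s[idx:idx+step]):
--                     cnt += 1
--                 else:
--                     sub_l -= len(str(cnt))
--                     cnt = 1
--                 sub_l += len(s[idx+step:idx+2*step])
--             sub_l -= len(str(cnt))
--         new_l = l - sub_l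
--         min_l = min(new_l, min_l)
--     return min_l
-- ===== SOURCE B (Python) =====
-- def solution(s):
--     l = len(s)
--     best = l
--     for step in range(1, l // 2 + 1):
--         # pn[i] = how many positions j < i satisfy s[j] == s[j + step]
--         pn = [0] * (l + 1)
--         for i in range(l):
--             pn[i + 1] = pn[i] + (i + step < l and s[i] == s[i + step])
--         # pf[i] = how many positions j < i satisfy s[j] == s[j % step]
--         pf = [0] * (l + 1)
--         for i in range(l):
--             pf[i + 1] = pf[i] + (s[i] == s[i % step])
--         saved = 0
--         cnt = 1
--         for idx in range(0, l - step, step):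
--             if pn[idx + step] - pn[idx] == step:
--                 if pf[idx + step] - pf[idx] == step:
--                     cnt += 1
--                 else:
--                     saved -= len(str(cnt))
--                     cnt = 1
--                 saved += step
--             saved -= len(str(cnt))
--         best = min(best, l - saved)
--     return best
-- ===== Notes on version B (the rewrite author's own statement) =====
-- stated objective: alternative
-- what changed: B replaces A's per-index string slicing and slice comparisons by two per-step prefix-sum match tables (s[j]==s[j+step] and s[j]==s[j%step]), so each block comparison becomes an O(1) window-count test; the counting loop over block starts stays.
import Mathlib
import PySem

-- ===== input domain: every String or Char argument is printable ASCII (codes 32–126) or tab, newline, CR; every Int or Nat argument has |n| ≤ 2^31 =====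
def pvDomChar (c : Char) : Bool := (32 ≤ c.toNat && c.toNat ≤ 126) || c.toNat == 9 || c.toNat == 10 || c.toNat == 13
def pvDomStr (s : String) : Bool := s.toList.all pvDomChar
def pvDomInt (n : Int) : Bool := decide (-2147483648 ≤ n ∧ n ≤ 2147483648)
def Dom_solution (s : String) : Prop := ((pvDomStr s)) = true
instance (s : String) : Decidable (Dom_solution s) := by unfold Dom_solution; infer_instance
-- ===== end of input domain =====

-- B computes the same compressed-length metric as A, but each block comparison is an O(1)
-- window-count test on two per-step prefix-sum match tables instead of a string-slice comparison.

-- ===== PORT A =====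
-- len(str(n))
def digitsA (n : Int) : Int := ((PySem.Int.toChars n).length : Int)

def solution (s : String) : Int :=
  let cs := s.toList
  let l : Int := (cs.length : Int)
  (PySem.List.pyRange 1 (PySem.Int.floordiv l 2 + 1) 1).foldl
    (fun min_l step =>
      let prev := PySem.List.slice cs none (some step)
      let r := (PySem.List.pyRange 0 (l - step) step).foldl
        (fun (st : Int × Int) idx =>
          let b := PySem.List.slice cs (some idx) (some (idx + step))
          let nx := PySem.List.slice cs (some (idx + step)) (some (idx + 2 * step))
          let st' :=
            if b = nx then
              if prev = b then (st.1 + (nx.length : Int), st.2 + 1)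
              else (st.1 - digitsA st.2 + (nx.length : Int), (1 : Int))
            else st
          (st'.1 - digitsA st'.2, st'.2))
        ((0 : Int), (1 : Int))
      min (l - r.1) min_l)
    l

-- ===== PORT B =====
-- len(str(n))
def digitsB (n : Int) : Int := ((PySem.Int.toChars n).length : Int)

-- pn[i] = number of positions j < i with  j + step < l  and  s[j] == s[j + step]
def pnTab (cs : List Char) (step : Nat) : Nat → Int
  | 0 => 0
  | i + 1 => pnTab cs step i + (if i + step < cs.length ∧ cs[i]? = cs[i + step]? then 1 else 0)

-- pf[i] = number of positions j < i with  s[j] == s[j % step]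
def pfTab (cs : List Char) (step : Nat) : Nat → Int
  | 0 => 0
  | i + 1 => pfTab cs step i + (if cs[i]? = cs[i % step]? then 1 else 0)

def solution_alt (s : String) : Int :=
  let cs := s.toList
  let l : Int := (cs.length : Int)
  (PySem.List.pyRange 1 (PySem.Int.floordiv l 2 + 1) 1).foldl
    (fun best step =>
      let pn := pnTab cs step.toNat
      let pf := pfTab cs step.toNat
      let r := (PySem.List.pyRange 0 (l - step) step).foldl
        (fun (st : Int × Int) idx =>
          let st' :=
            if pn (idx + step).toNat - pn idx.toNat = step then
              if pf (idx + step).toNat - pf idx.toNat = step then (st.1 + step, st.2 + 1)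
              else (st.1 - digitsB st.2 + step, (1 : Int))
            else st
          (st'.1 - digitsB st'.2, st'.2))
        ((0 : Int), (1 : Int))
      min best (l - r.1))
    l

-- ===== PRECONDITION & SPEC =====
def Spec_solution (s : String) (out : Int) : Prop := out = solution_alt s
instance (s : String) (out : Int) : Decidable (Spec_solution s out) := by unfold Spec_solution; infer_instance

-- ===== CLAIM (what is proved, stated in full; the proofs are below) =====
def Claim_equal_solution : Prop := ∀ (s : String), Dom_solution s → Spec_solution s (solution s)

-- ===== LEMMAS AND PROOFS =====

-- a prefix-sum of 0/1 increments grows by at most the window length …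
theorem tab_le (F : Nat → Int) (g : Nat → Prop) [DecidablePred g]
    (hFs : ∀ i, F (i + 1) = F i + (if g i then 1 else 0)) :
    ∀ n k : Nat, F (n + k) - F n ≤ (k : Int) := by
  intro n k
  induction k with
  | zero => simp
  | succ k ih =>
    rw [show n + (k + 1) = (n + k) + 1 from rfl, hFs]
    split_ifs <;> push_cast <;> omega

-- … and fills it exactly iff every increment in the window is 1
theorem tab_window (F : Nat → Int) (g : Nat → Prop) [DecidablePred g]
    (hFs : ∀ i, F (i + 1) = F i + (if g i then 1 else 0)) (n k : Nat) :
    F (n + k) - F n = (k : Int) ↔ ∀ i, n ≤ i → i < n + k → g i := by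
  induction k with
  | zero => simp; omega
  | succ k ih =>
    rw [show n + (k + 1) = (n + k) + 1 from rfl, hFs]
    have hle := tab_le F g hFs n k
    constructor
    · intro h i h1 h2
      have hg : g (n + k) := by by_contra hng; rw [if_neg hng] at h; push_cast at h; omega
      rcases Nat.lt_or_ge i (n + k) with hi | hi
      · have : F (n + k) - F n = (k : Int) := by
          rw [if_pos hg] at h; push_cast at h; omega
        exact (ih.1 this) i h1 hi
      · have : i = n + k := by omega
        exact this ▸ hg
    · intro h
      have hg : g (n + k) := h _ (by omega) (by omega)
      have : F (n + k) - F n = (k : Int) := ih.2 (fun i h1 h2 => h i h1 (by omega))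
      rw [if_pos hg]; push_cast; omega

theorem pnTab_step (cs : List Char) (step i : Nat) :
    pnTab cs step (i + 1) = pnTab cs step i +
      (if i + step < cs.length ∧ cs[i]? = cs[i + step]? then 1 else 0) := rfl

theorem pfTab_step (cs : List Char) (step i : Nat) :
    pfTab cs step (i + 1) = pfTab cs step i +
      (if cs[i]? = cs[i % step]? then 1 else 0) := rfl

theorem getElem?_drop_take (cs : List Char) (a k j : Nat) :
    ((cs.drop a).take k)[j]? = if j < k then cs[a + j]? else none := by
  rw [List.getElem?_take]
  split_ifs with h
  · rw [List.getElem?_drop]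
  · rfl

-- A's pairwise-block comparison  s[idx:idx+step] == s[idx+step:idx+2*step]
-- is the pn-window test, for idx + step < len
theorem eq_next_iff (cs : List Char) (n st : Nat) (hlt : n + st < cs.length) :
    ((cs.drop n).take st = (cs.drop (n + st)).take st) ↔
      pnTab cs st (n + st) - pnTab cs st n = (st : Int) := by
  rw [tab_window (pnTab cs st) _ (fun i => pnTab_step cs st i) n st]
  constructor
  · intro h i h1 h2
    have hj : ((cs.drop n).take st)[i - n]? = ((cs.drop (n + st)).take st)[i - n]? := by rw [h]
    rw [getElem?_drop_take, getElem?_drop_take, if_pos (by omega), if_pos (by omega)] at hj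
    rw [show n + (i - n) = i by omega, show n + st + (i - n) = i + st by omega] at hj
    -- i + st < cs.length: otherwise the RHS is none while the LHS is some
    by_cases hr : i + st < cs.length
    · exact ⟨hr, hj⟩
    · exfalso
      have hnone : cs[i + st]? = none := List.getElem?_eq_none (by omega)
      rw [hnone] at hj
      have hi : i < cs.length := by omega
      rw [List.getElem?_eq_getElem hi] at hj
      exact Option.some_ne_none _ hj
  · intro h
    apply List.ext_getElem?
    intro j
    rw [getElem?_drop_take, getElem?_drop_take]
    split_ifs with hj
    · have := h (n + j) (by omega) (by omega)
      rw [show n + j + st = n + st + j by omega] at this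
      exact this.2
    · rfl

-- A's  prev == block  comparison is the pf-window test, for step ∣ idx and idx + step < len
theorem eq_first_iff (cs : List Char) (n st : Nat) (hlt : n + st < cs.length)
    (hdvd : st ∣ n) :
    (cs.take st = (cs.drop n).take st) ↔
      pfTab cs st (n + st) - pfTab cs st n = (st : Int) := by
  rw [tab_window (pfTab cs st) _ (fun i => pfTab_step cs st i) n st]
  have hmod : ∀ i : Nat, n ≤ i → i < n + st → i % st = i - n := by
    intro i h1 h2
    obtain ⟨m, rfl⟩ := hdvd
    calc i % st = (st * m + (i - st * m)) % st := by rw [show st * m + (i - st * m) = i by omega]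
      _ = (i - st * m) % st := Nat.mul_add_mod st m (i - st * m)
      _ = i - st * m := Nat.mod_eq_of_lt (by omega)
  constructor
  · intro h i h1 h2
    have hj : (cs.take st)[i - n]? = ((cs.drop n).take st)[i - n]? := by rw [h]
    rw [List.getElem?_take, getElem?_drop_take, if_pos (by omega), if_pos (by omega)] at hj
    rw [show n + (i - n) = i by omega] at hj
    rw [hmod i h1 h2]
    exact hj.symm
  · intro h
    apply List.ext_getElem?
    intro j
    rw [List.getElem?_take, getElem?_drop_take]
    split_ifs with hj
    · have := h (n + j) (by omega) (by omega)
      rw [hmod (n + j) (by omega) (by omega), show n + j - n = j by omega] at this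
      exact this.symm
    · rfl

-- the two inner step functions agree on every idx the inner range produces
theorem inner_fun_eq (cs : List Char) (l step idx : Int)
    (hl : l = (cs.length : Int)) (hstep : 0 < step)
    (hidx : 0 ≤ idx) (hlt : idx < l - step) (hdvd : step ∣ idx) (st : Int × Int) :
    (let b := PySem.List.slice cs (some idx) (some (idx + step))
     let nx := PySem.List.slice cs (some (idx + step)) (some (idx + 2 * step))
     let st' :=
       if b = nx then
         if PySem.List.slice cs none (some step) = b then (st.1 + (nx.length : Int), st.2 + 1)
         else (st.1 - digitsA st.2 + (nx.length : Int), (1 : Int))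
       else st
     ((st'.1 - digitsA st'.2, st'.2) : Int × Int))
    =
    (let st' :=
       if pnTab cs step.toNat (idx + step).toNat - pnTab cs step.toNat idx.toNat = step then
         if pfTab cs step.toNat (idx + step).toNat - pfTab cs step.toNat idx.toNat = step then
           (st.1 + step, st.2 + 1)
         else (st.1 - digitsB st.2 + step, (1 : Int))
       else st
     (st'.1 - digitsB st'.2, st'.2)) := by
  obtain ⟨n, rfl⟩ : ∃ n : Nat, idx = (n : Nat) := ⟨idx.toNat, by omega⟩
  obtain ⟨t, rfl⟩ : ∃ t : Nat, step = (t : Nat) := ⟨step.toNat, by omega⟩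
  have ht : 0 < t := by exact_mod_cast hstep
  have hnlt : n + t < cs.length := by omega
  have hdvd' : t ∣ n := by exact_mod_cast Int.natCast_dvd_natCast.mp hdvd
  have e1 : PySem.List.slice cs (some (n : Int)) (some ((n : Int) + (t : Int))) =
      (cs.drop n).take t := PySem.List.slice_natCast_add cs n t
  have e2 : PySem.List.slice cs (some ((n : Int) + (t : Int))) (some ((n : Int) + 2 * (t : Int))) =
      (cs.drop (n + t)).take t := by
    rw [show (n : Int) + (t : Int) = ((n + t : Nat) : Int) by push_cast; ring,
        show (n : Int) + 2 * (t : Int) = ((n + t : Nat) : Int) + ((t : Nat) : Int) by push_cast; ring]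
    exact PySem.List.slice_natCast_add cs (n + t) t
  have e3 : PySem.List.slice cs none (some ((t : Nat) : Int)) = cs.take t :=
    PySem.List.slice_to_natCast cs t
  have etn : ((t : Int)).toNat = t := by omega
  have enn : (((n : Int)) + (t : Int)).toNat = n + t := by omega
  have enx : ((n : Int)).toNat = n := by omega
  simp only [e1, e2, e3, etn, enn, enx]
  by_cases h1 : pnTab cs t (n + t) - pnTab cs t n = (t : Int)
  · have hbn : (cs.drop n).take t = (cs.drop (n + t)).take t :=
      (eq_next_iff cs n t hnlt).mpr h1
    have hlen : (((cs.drop (n + t)).take t).length : Int) = (t : Int) := by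
      have hw := (tab_window (pnTab cs t) _ (fun i => pnTab_step cs t i) n t).mp h1
      have hend := (hw (n + t - 1) (by omega) (by omega)).1
      simp only [List.length_take, List.length_drop]
      omega
    rw [if_pos hbn, if_pos h1]
    by_cases h2 : pfTab cs t (n + t) - pfTab cs t n = (t : Int)
    · rw [if_pos ((eq_first_iff cs n t hnlt hdvd').mpr h2), if_pos h2, hlen]
      rfl
    · rw [if_neg (fun hh => h2 ((eq_first_iff cs n t hnlt hdvd').mp hh)), if_neg h2, hlen]
      rfl
  · rw [if_neg (fun hh => h1 ((eq_next_iff cs n t hnlt).mp hh)), if_neg h1]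
    rfl

-- ===== VERDICT (by name: the statement is the Claim_ definition above) =====
theorem solution_spec : Claim_equal_solution := by
  intro s _
  unfold Spec_solution solution solution_alt
  apply PySem.List.foldl_congr_mem
  intro best step hmem
  have hstep : 1 ≤ step := ((PySem.List.mem_pyRange_one).1 hmem).1
  have hinner :
      (PySem.List.pyRange 0 ((s.toList.length : Int) - step) step).foldl
        (fun (st : Int × Int) idx =>
          let b := PySem.List.slice s.toList (some idx) (some (idx + step))
          let nx := PySem.List.slice s.toList (some (idx + step)) (some (idx + 2 * step))
          let st' :=
            if b = nx then
              if PySem.List.slice s.toList none (some step) = b then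
                (st.1 + (nx.length : Int), st.2 + 1)
              else (st.1 - digitsA st.2 + (nx.length : Int), (1 : Int))
            else st
          (st'.1 - digitsA st'.2, st'.2))
        ((0 : Int), (1 : Int))
      = (PySem.List.pyRange 0 ((s.toList.length : Int) - step) step).foldl
        (fun (st : Int × Int) idx =>
          let st' :=
            if pnTab s.toList step.toNat (idx + step).toNat
                 - pnTab s.toList step.toNat idx.toNat = step then
              if pfTab s.toList step.toNat (idx + step).toNat
                   - pfTab s.toList step.toNat idx.toNat = step then
                (st.1 + step, st.2 + 1)
              else (st.1 - digitsB st.2 + step, (1 : Int))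
            else st
          (st'.1 - digitsB st'.2, st'.2))
        ((0 : Int), (1 : Int)) := by
    apply PySem.List.foldl_congr_mem
    intro acc idx hidx
    obtain ⟨h0, h1, h2⟩ :=
      (PySem.List.mem_pyRange_iff_of_pos (show (0 : Int) < step by omega) idx).1 hidx
    exact inner_fun_eq s.toList (s.toList.length : Int) step idx rfl (by omega) h0 h1
      (by simpa using h2) acc
  simp only [hinner, min_comm]
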